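-- pv_equiv track=rewrite | github.com/mathhat/Timeseries-Forecasting | tools.py | extract_indices
-- ===== SOURCE A (Python) =====
-- def extract_indices(mask,kernel,future,arraysize,indices,arrays):
--     counter = 0
--     for i in range(arraysize-future):
--         if mask[i]==True:
--             counter = counter + 1
--             if counter >= kernel and mask[i+future]==True:
--                 indices.append(list(range(i-kernel+1,i+1))+[i+future])
--         else:
--             counter = 0
--     return indices
-- ===== SOURCE B (Python) =====
-- def extract_indices(mask, kernel, future, arraysize, indices, arrays):
--     for i in range(arraysize - future):
--         lo = i - kernel + 1
--         if mask[i] == True and lo >= 0 and all(mask[j] == True for j in range(lo, i + 1)) \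
--                 and mask[i + future] == True:
--             indices.append(list(range(lo, i + 1)) + [i + future])
--     return indices
-- ===== Notes on version B (the rewrite author's own statement) =====
-- stated objective: alternative
-- what changed: A's single incremental pass with a running consecutive-True counter is replaced by a stateless loop that decides each index independently by rescanning the kernel-length window ending at i (explicit i-kernel+1>=0 guard plus all() over the window).
-- outside the precondition, e.g. on extract_indices([False, False], 1, -3, -1, [], []): A returns [], B returns []; on extract_indices([True], 2, 1, 2, [], []): A returns [], B returns []
import Mathlib
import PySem

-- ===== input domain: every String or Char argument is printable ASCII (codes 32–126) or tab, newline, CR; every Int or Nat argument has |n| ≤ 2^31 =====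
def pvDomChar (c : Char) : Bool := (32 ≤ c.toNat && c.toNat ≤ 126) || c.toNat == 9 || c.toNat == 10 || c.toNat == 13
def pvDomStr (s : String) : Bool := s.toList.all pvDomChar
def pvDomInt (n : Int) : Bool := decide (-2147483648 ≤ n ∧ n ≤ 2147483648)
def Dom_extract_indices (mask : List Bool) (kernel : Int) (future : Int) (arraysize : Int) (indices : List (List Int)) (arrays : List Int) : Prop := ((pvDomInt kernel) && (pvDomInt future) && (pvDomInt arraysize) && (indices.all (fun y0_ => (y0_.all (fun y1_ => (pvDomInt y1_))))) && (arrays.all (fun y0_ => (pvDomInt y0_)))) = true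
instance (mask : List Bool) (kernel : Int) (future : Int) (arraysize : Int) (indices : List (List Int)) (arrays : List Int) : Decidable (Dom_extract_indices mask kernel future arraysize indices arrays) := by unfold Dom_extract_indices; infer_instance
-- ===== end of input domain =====

-- B replaces A's running counter by a direct scan of the kernel-length window ending at i
-- (alternative strategy, same complexity class for small kernels; not claimed faster).
-- Both Pythons also append to `indices` in place; the theorems are about the return value.

-- mask[i] (value when in range; the raising cases are excluded by Pre_)
def pvGetB (mask : List Bool) (i : Int) : Bool := (PySem.List.pyGet? mask i).getD false

-- ===== PORT A =====
def extract_indices (mask : List Bool) (kernel : Int) (future : Int) (arraysize : Int) (indices : List (List Int)) (arrays : List Int) : List (List Int) :=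
  ((PySem.List.pyRange 0 (arraysize - future) 1).foldl
    (fun (st : Int × List (List Int)) i =>
      if pvGetB mask i then
        let counter := st.1 + 1
        if counter ≥ kernel ∧ pvGetB mask (i + future) then
          (counter, st.2 ++ [PySem.List.pyRange (i - kernel + 1) (i + 1) 1 ++ [i + future]])
        else (counter, st.2)
      else (0, st.2))
    (0, indices)).2

-- ===== PORT B =====
def extract_indices_alt (mask : List Bool) (kernel : Int) (future : Int) (arraysize : Int) (indices : List (List Int)) (arrays : List Int) : List (List Int) :=
  (PySem.List.pyRange 0 (arraysize - future) 1).foldl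
    (fun (inds : List (List Int)) i =>
      let lo := i - kernel + 1
      if pvGetB mask i && decide (lo ≥ 0)
          && (PySem.List.pyRange lo (i + 1) 1).all (fun j => pvGetB mask j)
          && pvGetB mask (i + future) then
        inds ++ [PySem.List.pyRange lo (i + 1) 1 ++ [i + future]]
      else inds)
    indices

-- ===== PRECONDITION & SPEC =====
-- Pre_ excludes exactly the index accesses that can raise IndexError: every loop index i
-- in [0, arraysize-future) and every i+future must be a valid (possibly negative) index.
-- This is slightly conservative: A may still return when an out-of-range access sits in a
-- branch the run never executes (short-circuited); B behaves identically there anyway.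
def Pre_extract_indices (mask : List Bool) (kernel : Int) (future : Int) (arraysize : Int) (indices : List (List Int)) (arrays : List Int) : Prop :=
  arraysize - future ≤ 0 ∨
    (arraysize - future ≤ (mask.length : Int) ∧ arraysize ≤ (mask.length : Int) ∧
     -(mask.length : Int) ≤ future)
instance (mask : List Bool) (kernel : Int) (future : Int) (arraysize : Int) (indices : List (List Int)) (arrays : List Int) : Decidable (Pre_extract_indices mask kernel future arraysize indices arrays) := by unfold Pre_extract_indices; infer_instance

def pvWitness_extract_indices : List Bool × Int × Int × Int × List (List Int) × List Int :=
  ([true, true, true, false, true], 2, 1, 5, [], [])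

def Spec_extract_indices (mask : List Bool) (kernel : Int) (future : Int) (arraysize : Int) (indices : List (List Int)) (arrays : List Int) (out : List (List Int)) : Prop := out = extract_indices_alt mask kernel future arraysize indices arrays
instance (mask : List Bool) (kernel : Int) (future : Int) (arraysize : Int) (indices : List (List Int)) (arrays : List Int) (out : List (List Int)) : Decidable (Spec_extract_indices mask kernel future arraysize indices arrays out) := by unfold Spec_extract_indices; infer_instance

-- ===== CLAIM (what is proved, stated in full; the proofs are below) =====
def Claim_equal_extract_indices : Prop := ∀ (mask : List Bool) (kernel : Int) (future : Int) (arraysize : Int) (indices : List (List Int)) (arrays : List Int), Dom_extract_indices mask kernel future arraysize indices arrays → Pre_extract_indices mask kernel future arraysize indices arrays → Spec_extract_indices mask kernel future arraysize indices arrays (extract_indices mask kernel future arraysize indices arrays)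

-- ===== LEMMAS AND PROOFS =====

-- the run length of consecutive `true`s (under pvGetB) ending just before index n:
-- this is exactly A's counter after n loop iterations.
def pvRun (mask : List Bool) : Nat → Nat
  | 0 => 0
  | n + 1 => if pvGetB mask n then pvRun mask n + 1 else 0

-- characterisation of the counter by the window it certifies
lemma pvRun_ge (mask : List Bool) : ∀ (n m : Nat),
    (m ≤ pvRun mask n ↔ m ≤ n ∧ ∀ j : Nat, n - m ≤ j → j < n → pvGetB mask j = true) := by
  intro n
  induction n with
  | zero => intro m; cases m <;> simp [pvRun]
  | succ n ih =>
    intro m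
    cases m with
    | zero => simp; exact fun j h1 h2 => absurd h2 (by omega)
    | succ m =>
      simp only [pvRun]
      by_cases h : pvGetB mask n = true
      · rw [if_pos h]
        constructor
        · intro hle
          have := (ih m).mp (by omega)
          refine ⟨by omega, ?_⟩
          intro j h1 h2
          rcases Nat.lt_succ_iff_lt_or_eq.mp h2 with hj | hj
          · exact this.2 j (by omega) hj
          · subst hj; exact h
        · intro ⟨h1, h2⟩
          have : m ≤ pvRun mask n := (ih m).mpr ⟨by omega, fun j hj1 hj2 => h2 j (by omega) (by omega)⟩
          omega
      · rw [if_neg h]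
        constructor
        · omega
        · intro ⟨h1, h2⟩
          exact absurd (h2 n (by omega) (by omega)) h

-- under mask[n] = true, the window test of B equals the counter test of A
lemma window_iff (mask : List Bool) (kernel : Int) (n : Nat) (hn : pvGetB mask (n : Int) = true) :
    ((decide ((n : Int) - kernel + 1 ≥ 0)
      && (PySem.List.pyRange ((n : Int) - kernel + 1) ((n : Int) + 1) 1).all (fun j => pvGetB mask j)) = true)
    ↔ kernel ≤ (pvRun mask n : Int) + 1 := by
  have hr : pvRun mask (n + 1) = pvRun mask n + 1 := by simp [pvRun, hn]
  by_cases hk : kernel ≤ 0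
  · constructor
    · intro _; omega
    · intro _
      simp only [Bool.and_eq_true, decide_eq_true_eq, List.all_eq_true]
      refine ⟨by omega, ?_⟩
      intro j hj
      rw [PySem.List.mem_pyRange_one] at hj
      omega
  · constructor
    · intro h
      simp only [Bool.and_eq_true, decide_eq_true_eq, List.all_eq_true] at h
      obtain ⟨h0, hall⟩ := h
      have hge : kernel.toNat ≤ pvRun mask (n + 1) := by
        rw [pvRun_ge]
        refine ⟨by omega, ?_⟩
        intro j hj1 hj2
        exact hall _ (by rw [PySem.List.mem_pyRange_one]; omega)
      omega
    · intro h
      have hge : kernel.toNat ≤ pvRun mask (n + 1) := by omega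
      rw [pvRun_ge] at hge
      simp only [Bool.and_eq_true, decide_eq_true_eq, List.all_eq_true]
      refine ⟨by omega, ?_⟩
      intro j hj
      rw [PySem.List.mem_pyRange_one] at hj
      obtain ⟨jn, rfl⟩ : ∃ jn : Nat, j = (jn : Int) := ⟨j.toNat, by omega⟩
      exact hge.2 jn (by omega) (by omega)

lemma loop_eq (mask : List Bool) (kernel future : Int) (n : Nat) (indices : List (List Int)) :
    (PySem.List.pyRange 0 (n : Int) 1).foldl
      (fun (st : Int × List (List Int)) i =>
        if pvGetB mask i then
          let counter := st.1 + 1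
          if counter ≥ kernel ∧ pvGetB mask (i + future) then
            (counter, st.2 ++ [PySem.List.pyRange (i - kernel + 1) (i + 1) 1 ++ [i + future]])
          else (counter, st.2)
        else (0, st.2))
      (0, indices)
    = ((pvRun mask n : Int),
       (PySem.List.pyRange 0 (n : Int) 1).foldl
         (fun (inds : List (List Int)) i =>
           let lo := i - kernel + 1
           if pvGetB mask i && decide (lo ≥ 0)
               && (PySem.List.pyRange lo (i + 1) 1).all (fun j => pvGetB mask j)
               && pvGetB mask (i + future) then
             inds ++ [PySem.List.pyRange lo (i + 1) 1 ++ [i + future]]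
           else inds)
         indices) := by
  induction n with
  | zero => simp [PySem.List.pyRange_one_eq_nil, pvRun]
  | succ n ih =>
    have hsplit : PySem.List.pyRange 0 ((n : Int) + 1) 1
        = PySem.List.pyRange 0 (n : Int) 1 ++ [(n : Int)] := by
      exact PySem.List.pyRange_one_succ_right (by omega)
    push_cast
    rw [hsplit, List.foldl_append, List.foldl_append, ih]
    simp only [List.foldl_cons, List.foldl_nil]
    rcases Bool.eq_false_or_eq_true (pvGetB mask (n : Int)) with hn | hn
    case inr =>
      rw [if_neg (by simp [hn]), if_neg (by simp [hn])]
      simp [pvRun, hn]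
    case inl =>
      rw [if_pos hn]
      by_cases hc : ((pvRun mask n : Int) + 1 ≥ kernel ∧ pvGetB mask ((n : Int) + future) = true)
      · rw [if_pos hc, if_pos (by
          simp only [Bool.and_eq_true]
          have hw := (window_iff mask kernel n hn).mpr (by omega)
          simp only [Bool.and_eq_true] at hw
          exact ⟨⟨⟨hn, hw.1⟩, hw.2⟩, hc.2⟩)]
        simp [pvRun, hn]
      · rw [if_neg hc, if_neg (by
          intro h
          simp only [Bool.and_eq_true] at h
          exact hc ⟨by
            have := (window_iff mask kernel n hn).mp (by
              simp only [Bool.and_eq_true]; exact ⟨h.1.1.2, h.1.2⟩)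
            omega, h.2⟩)]
        simp [pvRun, hn]

-- ===== VERDICT (by name: the statement is the Claim_ definition above) =====
theorem extract_indices_spec : Claim_equal_extract_indices := by
  intro mask kernel future arraysize indices arrays _ _
  unfold Spec_extract_indices extract_indices extract_indices_alt
  by_cases h : arraysize - future ≤ 0
  · rw [PySem.List.pyRange_one_eq_nil h]
    simp
  · have hn : arraysize - future = ((arraysize - future).toNat : Nat) := by omega
    rw [hn, loop_eq]
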